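-- pv_equiv track=rewrite | github.com/abiusch/penny_assistant | security_context_optimizer.py | _compress_sequence
-- ===== SOURCE A (Python) =====
-- def _compress_sequence(sequence: str) -> str:
--     """Compress a sequence using learned patterns"""
--
--     # Replace common security terms with abbreviations
--     abbreviations = {
--         "permission_check": "perm_chk",
--         "access_granted": "acc_ok",
--         "access_denied": "acc_deny",
--         "security_violation": "sec_viol",
--         "event_type": "type",
--         "operation": "op",
--         "resource": "res",
--         "user_id": "user",
--         "session_id": "sess",
--         "timestamp": "ts",
--         "parameters": "params",
--         "description": "desc"
--     }
--
--     compressed = sequence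
--     for full_form, abbrev in abbreviations.items():
--         compressed = compressed.replace(full_form, abbrev)
--
--     # Remove redundant words
--     redundant_words = ["the", "a", "an", "is", "was", "were", "has", "have", "had"]
--     words = compressed.split()
--     filtered_words = [word for word in words if word.lower() not in redundant_words]
--
--     return " ".join(filtered_words)
-- ===== SOURCE B (Python) =====
-- _RULES = [r.split(">") for r in (
--     "permission_check>perm_chk access_granted>acc_ok access_denied>acc_deny "
--     "security_violation>sec_viol event_type>type operation>op resource>res "
--     "user_id>user session_id>sess timestamp>ts parameters>params description>desc"
-- ).split()]
--
-- _STOP = "the a an is was were has have had".split()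
--
--
-- def _compress_sequence(sequence: str) -> str:
--     """Compress a sequence using learned patterns.
--
--     One pass over the words (no abbreviation contains whitespace, so the
--     replacements never cross word boundaries): each word is abbreviated by
--     splitting on the full form and joining with the abbreviation, and the
--     stop-word filter is fused into the same loop.
--     """
--     kept = []
--     for word in sequence.split():
--         for full, ab in _RULES:
--             word = ab.join(word.split(full))
--         if word.lower() not in _STOP:
--             kept.append(word)
--     return " ".join(kept)
-- ===== Notes on version B (the rewrite author's own statement) =====
-- stated objective: alternative
-- what changed: Instead of twelve whole-string replace passes followed by a separate split/filter/join phase, B splits once and makes a single pass over the words with the stop-word filter fused in, realizes each replacement as split-on-pattern + join instead of str.replace, and derives both tables from compact spec strings (sound because no abbreviation key or value contains whitespace, so replacements never cross word boundaries, and v.join(s.split(k)) equals s.replace(k, v)).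
import Mathlib
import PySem

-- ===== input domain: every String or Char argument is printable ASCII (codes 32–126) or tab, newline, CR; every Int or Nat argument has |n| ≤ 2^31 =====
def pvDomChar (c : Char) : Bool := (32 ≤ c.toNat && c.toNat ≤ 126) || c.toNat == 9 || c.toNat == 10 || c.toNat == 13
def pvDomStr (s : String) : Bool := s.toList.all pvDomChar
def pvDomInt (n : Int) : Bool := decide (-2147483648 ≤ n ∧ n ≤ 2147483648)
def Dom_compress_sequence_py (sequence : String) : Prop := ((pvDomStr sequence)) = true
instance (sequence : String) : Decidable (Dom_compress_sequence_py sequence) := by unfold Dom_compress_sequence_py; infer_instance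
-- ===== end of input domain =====

-- B makes a single pass over the words (abbreviation + stop-word filter fused), realizes each
-- replacement as split-on-pattern + join, and parses its tables from compact spec strings,
-- instead of A's twelve whole-string replace passes followed by a separate split/filter/join phase.

-- ===== PORT A =====
-- the `abbreviations` dict of A, as an association list in insertion order
def pvAbbrevs : List (String × String) :=
  [("permission_check", "perm_chk"), ("access_granted", "acc_ok"), ("access_denied", "acc_deny"),
   ("security_violation", "sec_viol"), ("event_type", "type"), ("operation", "op"),
   ("resource", "res"), ("user_id", "user"), ("session_id", "sess"), ("timestamp", "ts"),
   ("parameters", "params"), ("description", "desc")]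

-- the `redundant_words` list of A
def pvRedundant : List String := ["the", "a", "an", "is", "was", "were", "has", "have", "had"]

def compress_sequence_py (sequence : String) : String :=
  let compressed := pvAbbrevs.foldl (fun s p => PySem.Str.replace s p.1 p.2) sequence
  let words := PySem.Str.split₀ compressed
  let filtered := words.filter (fun word => !(pvRedundant.contains (PySem.Str.lower word)))
  PySem.Str.join " " filtered

-- ===== PORT B =====
-- B's compact rule spec string
def pvSpecB : String :=
  "permission_check>perm_chk access_granted>acc_ok access_denied>acc_deny security_violation>sec_viol event_type>type operation>op resource>res user_id>user session_id>sess timestamp>ts parameters>params description>desc"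

-- `r.split(">")` with the two-element tuple unpacking of Source B's comprehension
def pvRuleOf (r : String) : String × String :=
  match PySem.Str.split? r ">" with
  | some [a, b] => (a, b)
  | _ => ("", "")

-- B's `_RULES`
def pvRules : List (String × String) := (PySem.Str.split₀ pvSpecB).map pvRuleOf

-- B's `_STOP`
def pvStopB : List String := PySem.Str.split₀ "the a an is was were has have had"

-- `s.split(sep)`: every separator Source B passes is a nonempty literal, so split? is always `some`
def pySplitB (s sep : String) : List String := (PySem.Str.split? s sep).getD [s]

def compress_sequence_py_alt (sequence : String) : String :=
  let kept := (PySem.Str.split₀ sequence).foldl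
    (fun kept word =>
      let word := pvRules.foldl (fun w p => PySem.Str.join p.2 (pySplitB w p.1)) word
      if !(pvStopB.contains (PySem.Str.lower word)) then kept ++ [word] else kept) []
  PySem.Str.join " " kept

-- ===== PRECONDITION & SPEC =====
def Spec_compress_sequence_py (sequence : String) (out : String) : Prop := out = compress_sequence_py_alt sequence
instance (sequence : String) (out : String) : Decidable (Spec_compress_sequence_py sequence out) := by unfold Spec_compress_sequence_py; infer_instance

-- ===== CLAIM (what is proved, stated in full; the proofs are below) =====
def Claim_equal_compress_sequence_py : Prop := ∀ (sequence : String), Dom_compress_sequence_py sequence → Spec_compress_sequence_py sequence (compress_sequence_py sequence)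

-- ===== LEMMAS AND PROOFS =====

def pvRepF (old new : List Char) : Nat → List Char → List Char
  | _, [] => []
  | 0, l => l
  | f + 1, c :: t =>
      if old.isPrefixOf (c :: t) then new ++ pvRepF old new f (List.drop old.length (c :: t))
      else c :: pvRepF old new f t

def pvRep (old new : List Char) (l : List Char) : List Char := pvRepF old new l.length l

theorem pvRepF_go (old new : List Char) :
    ∀ (fuel : Nat) (l acc : List Char),
      PySem.Chars.replace.go old new fuel l acc = acc.reverse ++ pvRepF old new fuel l := by
  intro fuel
  induction fuel with
  | zero => intro l acc; cases l <;> simp [PySem.Chars.replace.go, pvRepF]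
  | succ f ih =>
    intro l acc
    cases l with
    | nil => simp [PySem.Chars.replace.go, pvRepF]
    | cons c t =>
      simp only [PySem.Chars.replace.go, pvRepF]
      split
      · rw [ih]; simp
      · rw [ih]; simp

theorem pvRep_eq_replace (old new l : List Char) (h : old ≠ []) :
    PySem.Chars.replace l old new = pvRep old new l := by
  rw [PySem.Chars.replace]
  simp [List.isEmpty_iff, h, pvRepF_go, pvRep]

theorem pvRepF_fuel (old new : List Char) (h : old ≠ []) :
    ∀ (f f' : Nat) (l : List Char), l.length ≤ f → l.length ≤ f' →
      pvRepF old new f l = pvRepF old new f' l := by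
  intro f
  induction f with
  | zero =>
    intro f' l hl hl'
    cases l <;> cases f' <;> simp_all [pvRepF]
  | succ f ih =>
    intro f' l hl hl'
    cases l with
    | nil => cases f' <;> simp [pvRepF]
    | cons c t =>
      cases f' with
      | zero => simp at hl'
      | succ f'' =>
        simp only [pvRepF]
        have hlen : t.length ≤ f := by simpa using hl
        have hlen' : t.length ≤ f'' := by simpa using hl'
        split
        · rename_i hp
          have hop : 0 < old.length := List.length_pos_iff.mpr h
          have hd : (List.drop old.length (c :: t)).length ≤ t.length := by
            simp [List.length_drop]; omega
          rw [ih _ _ (le_trans hd hlen) (le_trans hd hlen')]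
        · rw [ih _ _ hlen hlen']

theorem pvRep_cons (old new : List Char) (h : old ≠ []) (c : Char) (t : List Char) :
    pvRep old new (c :: t) =
      if old.isPrefixOf (c :: t) then new ++ pvRep old new (List.drop old.length (c :: t))
      else c :: pvRep old new t := by
  show pvRepF old new (t.length + 1) (c :: t) = _
  simp only [pvRepF]
  split
  · rename_i hp
    have hop : 0 < old.length := List.length_pos_iff.mpr h
    have hd : (List.drop old.length (c :: t)).length ≤ t.length := by
      simp [List.length_drop]; omega
    rw [pvRepF_fuel old new h _ _ _ hd (le_refl _)]; rfl
  · rfl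

theorem pvPrefix_boundary (old w r : List Char)
    (hsp : ∀ c ∈ old, PySem.Chars.isspace c = false)
    (hr : PySem.Chars.isspace (r.headD ' ') = true) :
    old.isPrefixOf (w ++ r) = old.isPrefixOf w := by
  cases hpw : old.isPrefixOf w with
  | true =>
    exact List.isPrefixOf_iff_prefix.mpr
      ((List.isPrefixOf_iff_prefix.mp hpw).trans (List.prefix_append w r))
  | false =>
    cases hpwr : old.isPrefixOf (w ++ r) with
    | false => rfl
    | true =>
      exfalso
      have hpre : old <+: w ++ r := List.isPrefixOf_iff_prefix.mp hpwr
      rcases Nat.lt_or_ge w.length old.length with hlt | hle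
      · cases r with
        | nil => rw [List.append_nil] at hpre; exact absurd hpre.length_le (Nat.not_le.mpr hlt)
        | cons d r' =>
          have hwold : w <+: old :=
            List.prefix_of_prefix_length_le (List.prefix_append w (d :: r')) hpre (Nat.le_of_lt hlt)
          obtain ⟨o', ho'⟩ := hwold
          have ho'ne : o' ≠ [] := by
            intro hnil; rw [hnil, List.append_nil] at ho'; rw [ho'] at hlt; omega
          obtain ⟨e, o'', rfl⟩ := List.exists_cons_of_ne_nil ho'ne
          rw [← ho'] at hpre
          obtain ⟨z, hz⟩ := hpre
          rw [List.append_assoc] at hz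
          have := List.append_cancel_left hz
          simp only [List.cons_append, List.cons.injEq] at this
          have hed : e = d := this.1
          have hef : PySem.Chars.isspace e = false := by
            apply hsp; rw [← ho']; simp
          simp only [List.headD_cons] at hr
          rw [hed, hr] at hef
          exact Bool.noConfusion hef
      · have : old <+: w := List.prefix_of_prefix_length_le hpre (List.prefix_append w r) hle
        rw [List.isPrefixOf_iff_prefix.mpr this] at hpw; exact Bool.noConfusion hpw

theorem pvRep_append (old new : List Char) (hold : old ≠ [])
    (hsp : ∀ c ∈ old, PySem.Chars.isspace c = false) :
    ∀ (n : Nat) (w r : List Char), w.length ≤ n →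
      PySem.Chars.isspace (r.headD ' ') = true →
      pvRep old new (w ++ r) = pvRep old new w ++ pvRep old new r := by
  intro n
  induction n with
  | zero =>
    intro w r hw _
    have : w = [] := by cases w <;> simp_all
    subst this; simp only [List.nil_append]; show ([] : List Char) ++ _ = pvRepF _ _ 0 [] ++ _; rfl
  | succ n ih =>
    intro w r hwn hr
    cases w with
    | nil => show pvRep _ _ ([] ++ r) = pvRepF _ _ 0 [] ++ _; rfl
    | cons c t =>
      rw [List.cons_append, pvRep_cons old new hold, pvRep_cons old new hold c t,
        show (c :: (t ++ r)) = ((c :: t) ++ r) from rfl,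
        pvPrefix_boundary old (c :: t) r hsp hr]
      split
      · rename_i hp
        have hple : old.length ≤ (c :: t).length := (List.isPrefixOf_iff_prefix.mp hp).length_le
        have hop : 0 < old.length := List.length_pos_iff.mpr hold
        rw [List.drop_append_of_le_length hple]
        rw [ih _ r (by simp at hwn ⊢; omega) hr]
        simp
      · rw [ih t r (by simpa using hwn) hr]; rfl

theorem pvRep_nospace (old new : List Char) (hold : old ≠ [])
    (hnew : ∀ c ∈ new, PySem.Chars.isspace c = false) :
    ∀ (n : Nat) (w : List Char), w.length ≤ n → (∀ c ∈ w, PySem.Chars.isspace c = false) →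
      ∀ c ∈ pvRep old new w, PySem.Chars.isspace c = false := by
  intro n
  induction n with
  | zero =>
    intro w hw hsp c hc
    have : w = [] := by cases w <;> simp_all
    subst this; simp [pvRep, pvRepF] at hc
  | succ n ih =>
    intro w hwn hwsp c hc
    cases w with
    | nil => simp [pvRep, pvRepF] at hc
    | cons a t =>
      rw [pvRep_cons old new hold] at hc
      split at hc
      · rename_i hp
        have hop : 0 < old.length := List.length_pos_iff.mpr hold
        rcases List.mem_append.mp hc with h | h
        · exact hnew c h
        · refine ih _ (by simp at hwn ⊢; omega) ?_ c h
          intro d hd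
          exact hwsp d (List.mem_of_mem_drop hd)
      · rcases List.mem_cons.mp hc with h | h
        · exact hwsp c (h ▸ List.mem_cons_self)
        · exact ih t (by simpa using hwn) (fun d hd => hwsp d (List.mem_cons_of_mem a hd)) c h

theorem pvRep_ne_nil (old new : List Char) (hold : old ≠ []) (hnew : new ≠ [])
    (w : List Char) (hw : w ≠ []) : pvRep old new w ≠ [] := by
  obtain ⟨c, t, rfl⟩ := List.exists_cons_of_ne_nil hw
  rw [pvRep_cons old new hold]
  split <;> simp [hnew]

theorem pvSplitGo_acc :
    ∀ (s cur : List Char) (acc : List (List Char)),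
      PySem.Chars.split₀.go s cur acc = acc.reverse ++ PySem.Chars.split₀.go s cur [] := by
  intro s
  induction s with
  | nil =>
    intro cur acc
    simp only [PySem.Chars.split₀.go]
    split <;> simp
  | cons c rest ih =>
    intro cur acc
    simp only [PySem.Chars.split₀.go]
    split
    · split
      · exact ih [] acc
      · rw [ih [] (cur.reverse :: acc), ih [] [cur.reverse]]; simp
    · exact ih (c :: cur) acc

theorem pvSplit_space (c : Char) (hc : PySem.Chars.isspace c = true) (x : List Char) :
    PySem.Chars.split₀ (c :: x) = PySem.Chars.split₀ x := by
  simp [PySem.Chars.split₀, PySem.Chars.split₀.go, hc]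

theorem pvSplitGo_word :
    ∀ (w : List Char), (∀ c ∈ w, PySem.Chars.isspace c = false) →
      ∀ (r cur : List Char) (acc : List (List Char)),
        PySem.Chars.split₀.go (w ++ r) cur acc = PySem.Chars.split₀.go r (w.reverse ++ cur) acc := by
  intro w
  induction w with
  | nil => intro _ r cur acc; simp
  | cons c t ih =>
    intro hw r cur acc
    have hc : PySem.Chars.isspace c = false := hw c List.mem_cons_self
    simp only [List.cons_append, PySem.Chars.split₀.go, hc]
    rw [ih (fun d hd => hw d (List.mem_cons_of_mem c hd)) r (c :: cur) acc]
    simp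

theorem pvSplit_word (w r : List Char) (hw : w ≠ [])
    (hwsp : ∀ c ∈ w, PySem.Chars.isspace c = false)
    (hr : PySem.Chars.isspace (r.headD ' ') = true) :
    PySem.Chars.split₀ (w ++ r) = w :: PySem.Chars.split₀ r := by
  show PySem.Chars.split₀.go (w ++ r) [] [] = _
  rw [pvSplitGo_word w hwsp r [] []]
  cases r with
  | nil =>
    simp only [PySem.Chars.split₀.go]
    have : (w.reverse ++ []).isEmpty = false := by
      simp [hw]
    rw [this]
    simp [PySem.Chars.split₀, PySem.Chars.split₀.go]
  | cons d r' =>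
    have hd : PySem.Chars.isspace d = true := by simpa using hr
    have hne : (w.reverse ++ ([] : List Char)).isEmpty = false := by simp [hw]
    simp only [PySem.Chars.split₀.go, hd, hne, if_true, if_false, Bool.false_eq_true]
    rw [pvSplitGo_acc]
    simp only [List.append_nil, List.reverse_reverse, List.reverse_cons, List.reverse_nil, List.nil_append, List.singleton_append, List.cons.injEq, true_and]
    exact (pvSplit_space d hd r').symm

theorem pvRep_space_head (old new : List Char) (hold : old ≠ [])
    (hsp : ∀ c ∈ old, PySem.Chars.isspace c = false)
    (d : Char) (hd : PySem.Chars.isspace d = true) (x : List Char) :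
    pvRep old new (d :: x) = d :: pvRep old new x := by
  rw [pvRep_cons old new hold]
  have : old.isPrefixOf (d :: x) = false := by
    cases old with
    | nil => exact absurd rfl hold
    | cons o os =>
      cases hpo : (o :: os).isPrefixOf (d :: x) with
      | false => rfl
      | true =>
        obtain ⟨z, hz⟩ := List.isPrefixOf_iff_prefix.mp hpo
        simp only [List.cons_append, List.cons.injEq] at hz
        have := hsp o List.mem_cons_self
        rw [hz.1, hd] at this
        exact Bool.noConfusion this
  rw [this]
  simp

theorem pvSplit_rep (old new : List Char) (hold : old ≠ [])
    (hsp : ∀ c ∈ old, PySem.Chars.isspace c = false)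
    (hnew : new ≠ []) (hnsp : ∀ c ∈ new, PySem.Chars.isspace c = false) :
    ∀ (n : Nat) (s : List Char), s.length ≤ n →
      PySem.Chars.split₀ (pvRep old new s) = (PySem.Chars.split₀ s).map (pvRep old new) := by
  intro n
  induction n with
  | zero =>
    intro s hs
    have : s = [] := by cases s <;> simp_all
    subst this
    simp [pvRep, pvRepF, PySem.Chars.split₀, PySem.Chars.split₀.go]
  | succ n ih =>
    intro s hs
    cases s with
    | nil => simp [pvRep, pvRepF, PySem.Chars.split₀, PySem.Chars.split₀.go]
    | cons c t =>
      by_cases hc : PySem.Chars.isspace c = true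
      · rw [pvRep_space_head old new hold hsp c hc, pvSplit_space c hc,
          pvSplit_space c hc, ih t (by simpa using hs)]
      · -- word case
        have hcf : PySem.Chars.isspace c = false := by
          cases h : PySem.Chars.isspace c; rfl; exact absurd h hc
        set q : Char → Bool := fun d => !(PySem.Chars.isspace d) with hq
        set w : List Char := c :: t.takeWhile q with hwdef
        set r : List Char := t.dropWhile q with hrdef
        have hsplit : c :: t = w ++ r := by
          rw [hwdef, hrdef, List.cons_append, List.takeWhile_append_dropWhile]
        have hwne : w ≠ [] := by simp [hwdef]
        have hwsp : ∀ d ∈ w, PySem.Chars.isspace d = false := by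
          intro d hd
          rcases List.mem_cons.mp hd with h | h
          · rw [h]; exact hcf
          · have := List.mem_takeWhile_imp h
            simpa [hq] using this
        have hrh : PySem.Chars.isspace (r.headD ' ') = true := by
          cases hr : r with
          | nil => decide
          | cons d r' =>
            have hdw : List.dropWhile q t = d :: r' := by rw [← hrdef]; exact hr
            have hne2 : List.dropWhile q t ≠ [] := by rw [hdw]; simp
            have hqd := List.head_dropWhile_not q hne2
            have hhd : (List.dropWhile q t).head hne2 = d := by
              have h1 : (List.dropWhile q t).head? = some d := by rw [hdw]; rfl
              rw [List.head?_eq_some_head hne2] at h1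
              exact Option.some.inj h1
            rw [hhd] at hqd
            simpa [hq] using hqd
        have hrlen : r.length ≤ n := by
          have h1 : w.length + r.length = (c :: t).length := by
            rw [hsplit]; simp
          have h2 : 1 ≤ w.length := by
            rw [hwdef]; simp
          simp at h1 hs; omega
        have hRw_ne : pvRep old new w ≠ [] := pvRep_ne_nil old new hold hnew w hwne
        have hRw_sp : ∀ d ∈ pvRep old new w, PySem.Chars.isspace d = false :=
          pvRep_nospace old new hold hnsp w.length w (le_refl _) hwsp
        have hRr_h : PySem.Chars.isspace ((pvRep old new r).headD ' ') = true := by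
          cases hr : r with
          | nil => simp [pvRep, pvRepF]; decide
          | cons d r' =>
            have hd : PySem.Chars.isspace d = true := by simpa [hr] using hrh
            rw [pvRep_space_head old new hold hsp d hd]
            simpa using hd
        rw [hsplit,
          pvRep_append old new hold hsp w.length w r (le_refl _) hrh,
          pvSplit_word w r hwne hwsp hrh,
          pvSplit_word (pvRep old new w) (pvRep old new r) hRw_ne hRw_sp hRr_h,
          ih r hrlen]
        simp

theorem pvStr_split_foldl_replace :
    ∀ (ps : List (String × String)),
      (∀ p ∈ ps, p.1.toList ≠ [] ∧ (∀ c ∈ p.1.toList, PySem.Chars.isspace c = false) ∧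
          p.2.toList ≠ [] ∧ (∀ c ∈ p.2.toList, PySem.Chars.isspace c = false)) →
      ∀ (s : String),
        PySem.Str.split₀ (ps.foldl (fun s p => PySem.Str.replace s p.1 p.2) s) =
          (PySem.Str.split₀ s).map (fun w => ps.foldl (fun w p => PySem.Str.replace w p.1 p.2) w) := by
  intro ps
  induction ps with
  | nil => intro _ s; simp
  | cons p ps ih =>
    intro hps s
    obtain ⟨h1, h2, h3, h4⟩ := hps p List.mem_cons_self
    have hps' := fun q hq => hps q (List.mem_cons_of_mem p hq)
    simp only [List.foldl_cons]
    rw [ih hps']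
    have hrep : PySem.Str.split₀ (PySem.Str.replace s p.1 p.2) =
        (PySem.Str.split₀ s).map (fun w => PySem.Str.replace w p.1 p.2) := by
      show (PySem.Chars.split₀ (PySem.Str.replace s p.1 p.2).toList).map String.ofList = _
      rw [PySem.Str.toList_replace, pvRep_eq_replace _ _ _ h1,
        pvSplit_rep p.1.toList p.2.toList h1 h2 h3 h4 s.toList.length s.toList (le_refl _)]
      show _ = ((PySem.Chars.split₀ s.toList).map String.ofList).map (fun w => PySem.Str.replace w p.1 p.2)
      rw [List.map_map, List.map_map]
      apply List.map_congr_left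
      intro l _
      show String.ofList (pvRep p.1.toList p.2.toList l) = PySem.Str.replace (String.ofList l) p.1 p.2
      rw [PySem.Str.replace, String.toList_ofList, pvRep_eq_replace _ _ _ h1]
    rw [hrep, List.map_map]
    rfl

-- ----- B's split-on-pattern + join equals str.replace -----

def pvModHead (f : List Char → List Char) : List (List Char) → List (List Char)
  | [] => []
  | p :: ps => f p :: ps

theorem pvSplitOnGo_acc (sep : List Char) :
    ∀ (fuel : Nat) (l cur : List Char) (acc : List (List Char)),
      PySem.Chars.splitOn.go sep fuel l cur acc =
        acc.reverse ++ PySem.Chars.splitOn.go sep fuel l cur [] := by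
  intro fuel
  induction fuel with
  | zero => intro l cur acc; cases l <;> simp [PySem.Chars.splitOn.go]
  | succ f ih =>
    intro l cur acc
    cases l with
    | nil => simp [PySem.Chars.splitOn.go]
    | cons c t =>
      simp only [PySem.Chars.splitOn.go]
      split
      · rw [ih _ _ (cur.reverse :: acc), ih _ _ [cur.reverse]]; simp
      · exact ih _ _ acc

theorem pvSplitOnGo_ne_nil (sep : List Char) :
    ∀ (fuel : Nat) (l cur : List Char) (acc : List (List Char)),
      PySem.Chars.splitOn.go sep fuel l cur acc ≠ [] := by
  intro fuel
  induction fuel with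
  | zero => intro l cur acc; cases l <;> simp [PySem.Chars.splitOn.go]
  | succ f ih =>
    intro l cur acc
    cases l with
    | nil => simp [PySem.Chars.splitOn.go]
    | cons c t =>
      simp only [PySem.Chars.splitOn.go]
      split
      · exact ih _ _ _
      · exact ih _ _ _

theorem pvModHead_comp (f g : List Char → List Char) (x : List (List Char)) :
    pvModHead f (pvModHead g x) = pvModHead (fun p => f (g p)) x := by
  cases x <;> rfl

theorem pvSplitOnGo_cur (sep : List Char) :
    ∀ (fuel : Nat) (l cur : List Char),
      PySem.Chars.splitOn.go sep fuel l cur [] =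
        pvModHead (fun p => cur.reverse ++ p) (PySem.Chars.splitOn.go sep fuel l [] []) := by
  intro fuel
  induction fuel with
  | zero => intro l cur; cases l <;> simp [PySem.Chars.splitOn.go, pvModHead]
  | succ f ih =>
    intro l cur
    cases l with
    | nil => simp [PySem.Chars.splitOn.go, pvModHead]
    | cons c t =>
      simp only [PySem.Chars.splitOn.go, List.reverse_nil]
      split
      · rw [pvSplitOnGo_acc sep f _ [] [cur.reverse], pvSplitOnGo_acc sep f _ [] [[]]]
        cases hG : PySem.Chars.splitOn.go sep f (List.drop sep.length (c :: t)) [] [] <;>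
          simp [pvModHead]
      · rw [ih t (c :: cur), ih t [c], pvModHead_comp]
        cases hG : PySem.Chars.splitOn.go sep f t [] [] <;> simp [pvModHead]

theorem pvJoin_splitOnGo (old new : List Char) :
    ∀ (fuel : Nat) (l : List Char),
      PySem.Chars.join new (PySem.Chars.splitOn.go old fuel l [] []) = pvRepF old new fuel l := by
  intro fuel
  induction fuel with
  | zero =>
    intro l
    cases l <;> simp [PySem.Chars.splitOn.go, pvRepF, PySem.Chars.join, List.intercalate]
  | succ f ih =>
    intro l
    cases l with
    | nil => simp [PySem.Chars.splitOn.go, pvRepF, PySem.Chars.join, List.intercalate]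
    | cons c t =>
      simp only [PySem.Chars.splitOn.go, pvRepF, List.reverse_nil]
      split
      · -- separator found at the head
        rw [pvSplitOnGo_acc old f _ [] [[]]]
        have hne := pvSplitOnGo_ne_nil old f (List.drop old.length (c :: t)) [] []
        cases hG : PySem.Chars.splitOn.go old f (List.drop old.length (c :: t)) [] [] with
        | nil => exact absurd hG hne
        | cons g gs =>
          have := ih (List.drop old.length (c :: t))
          rw [hG] at this
          simp only [List.reverse_cons, List.reverse_nil, List.nil_append, List.singleton_append]
          rw [PySem.Chars.join_cons_cons, ← this]
          simp
      · -- ordinary character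
        rw [pvSplitOnGo_cur old f t [c]]
        have hne := pvSplitOnGo_ne_nil old f t [] []
        cases hG : PySem.Chars.splitOn.go old f t [] [] with
        | nil => exact absurd hG hne
        | cons g gs =>
          have := ih t
          rw [hG] at this
          cases gs with
          | nil =>
            simp only [pvModHead, List.reverse_cons, List.reverse_nil, List.nil_append]
            rw [PySem.Chars.join_singleton] at this ⊢
            rw [← this]; rfl
          | cons g2 gs2 =>
            simp only [pvModHead, List.reverse_cons, List.reverse_nil, List.nil_append]
            rw [PySem.Chars.join_cons_cons] at this
            rw [PySem.Chars.join_cons_cons, ← this]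
            simp

theorem pvJoin_splitOn (old new l : List Char) (hold : old ≠ []) :
    PySem.Chars.join new (PySem.Chars.splitOn l old) = PySem.Chars.replace l old new := by
  rw [PySem.Chars.splitOn, pvJoin_splitOnGo old new, pvRep_eq_replace _ _ _ hold,
    pvRep, pvRepF_fuel old new hold (l.length + 1) l.length l (by omega) (le_refl _)]

theorem pvStr_join_split (w k v : String) (hk : k.toList ≠ []) :
    PySem.Str.join v (pySplitB w k) = PySem.Str.replace w k v := by
  have hkE : k.toList.isEmpty = false := by simp [hk]
  have hsplit : pySplitB w k = (PySem.Chars.splitOn w.toList k.toList).map String.ofList := by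
    simp [pySplitB, PySem.Str.split?, PySem.Chars.split?, hkE]
  rw [hsplit, PySem.Str.join, PySem.Str.replace, List.map_map]
  have : (PySem.Chars.splitOn w.toList k.toList).map (String.toList ∘ String.ofList) =
      PySem.Chars.splitOn w.toList k.toList := by
    simp [Function.comp_def]
  rw [this, pvJoin_splitOn _ _ _ hk]

set_option maxRecDepth 20000 in
theorem pvRules_eq : pvRules = pvAbbrevs := by decide

set_option maxRecDepth 20000 in
theorem pvStop_eq : pvStopB = pvRedundant := by decide

theorem pvFoldl_rules_eq_replace (w : String) :
    pvRules.foldl (fun w p => PySem.Str.join p.2 (pySplitB w p.1)) w =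
      pvAbbrevs.foldl (fun w p => PySem.Str.replace w p.1 p.2) w := by
  rw [pvRules_eq]
  have : ∀ (ps : List (String × String)), (∀ p ∈ ps, p.1.toList ≠ []) → ∀ (w : String),
      ps.foldl (fun w p => PySem.Str.join p.2 (pySplitB w p.1)) w =
        ps.foldl (fun w p => PySem.Str.replace w p.1 p.2) w := by
    intro ps
    induction ps with
    | nil => intro _ w; rfl
    | cons p ps ih =>
      intro hps w
      simp only [List.foldl_cons]
      rw [pvStr_join_split w p.1 p.2 (hps p List.mem_cons_self),
        ih (fun q hq => hps q (List.mem_cons_of_mem p hq))]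
  exact this pvAbbrevs (by decide) w

theorem compress_sequence_py_spec' (s : String) :
    compress_sequence_py s = compress_sequence_py_alt s := by
  have hcond : ∀ p ∈ pvAbbrevs, p.1.toList ≠ [] ∧
      (∀ c ∈ p.1.toList, PySem.Chars.isspace c = false) ∧ p.2.toList ≠ [] ∧
      (∀ c ∈ p.2.toList, PySem.Chars.isspace c = false) := by
    simp [pvAbbrevs, PySem.Chars.isspace]
  have hB : compress_sequence_py_alt s = PySem.Str.join " "
      ([] ++ ((PySem.Str.split₀ s).filter
          (fun word => !(pvStopB.contains (PySem.Str.lower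
            (pvRules.foldl (fun w p => PySem.Str.join p.2 (pySplitB w p.1)) word))))).map
        (fun word => pvRules.foldl (fun w p => PySem.Str.join p.2 (pySplitB w p.1)) word)) := by
    show PySem.Str.join " " (List.foldl _ _ _) = _
    rw [PySem.List.foldl_append_if
      (fun word => !(pvStopB.contains (PySem.Str.lower
        (pvRules.foldl (fun w p => PySem.Str.join p.2 (pySplitB w p.1)) word))))
      (fun word => pvRules.foldl (fun w p => PySem.Str.join p.2 (pySplitB w p.1)) word)]
  rw [hB]
  show PySem.Str.join " " ((PySem.Str.split₀
      (pvAbbrevs.foldl (fun s p => PySem.Str.replace s p.1 p.2) s)).filter _) = _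
  rw [pvStr_split_foldl_replace pvAbbrevs hcond s, List.filter_map]
  simp only [List.nil_append, Function.comp_def, pvFoldl_rules_eq_replace, pvStop_eq]

-- ===== VERDICT (by name: the statement is the Claim_ definition above) =====
theorem compress_sequence_py_spec : Claim_equal_compress_sequence_py := by
  intro s _
  unfold Spec_compress_sequence_py
  exact compress_sequence_py_spec' s
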